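-- pv_equiv track=rewrite | github.com/GreaterChen/dcm2niiTools | utils.py | get_max_bounding_box
-- ===== SOURCE A (Python) =====
-- def get_max_bounding_box(bbox_list):
--     # 将bbox_list中的每个bbox分别解包成6个独立的值
--     x_mins = [bbox[0][0] for bbox in bbox_list]
--     x_maxs = [bbox[0][1] for bbox in bbox_list]
--     y_mins = [bbox[1][0] for bbox in bbox_list]
--     y_maxs = [bbox[1][1] for bbox in bbox_list]
--     z_mins = [bbox[2][0] for bbox in bbox_list]
--     z_maxs = [bbox[2][1] for bbox in bbox_list]
--
--     max_bbox = (
--         (min(x_mins), max(x_maxs)),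
--         (min(y_mins), max(y_maxs)),
--         (min(z_mins), max(z_maxs))
--     )
--     return max_bbox
-- ===== SOURCE B (Python) =====
-- def get_max_bounding_box(bbox_list):
--     if not bbox_list:
--         raise ValueError("min() arg is an empty sequence")
--     (x_min, x_max), (y_min, y_max), (z_min, z_max) = bbox_list[0]
--     for (xa, xb), (ya, yb), (za, zb) in bbox_list[1:]:
--         x_min = min(x_min, xa)
--         x_max = max(x_max, xb)
--         y_min = min(y_min, ya)
--         y_max = max(y_max, yb)
--         z_min = min(z_min, za)
--         z_max = max(z_max, zb)
--     return ((x_min, x_max), (y_min, y_max), (z_min, z_max))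
-- ===== Notes on version B (the rewrite author's own statement) =====
-- stated objective: alternative
-- what changed: Replaces six list comprehensions plus six min/max reduction passes with a single fused traversal that keeps six running extremes; Pre_ excludes the empty list, on which both A and B raise ValueError.
import Mathlib
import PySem

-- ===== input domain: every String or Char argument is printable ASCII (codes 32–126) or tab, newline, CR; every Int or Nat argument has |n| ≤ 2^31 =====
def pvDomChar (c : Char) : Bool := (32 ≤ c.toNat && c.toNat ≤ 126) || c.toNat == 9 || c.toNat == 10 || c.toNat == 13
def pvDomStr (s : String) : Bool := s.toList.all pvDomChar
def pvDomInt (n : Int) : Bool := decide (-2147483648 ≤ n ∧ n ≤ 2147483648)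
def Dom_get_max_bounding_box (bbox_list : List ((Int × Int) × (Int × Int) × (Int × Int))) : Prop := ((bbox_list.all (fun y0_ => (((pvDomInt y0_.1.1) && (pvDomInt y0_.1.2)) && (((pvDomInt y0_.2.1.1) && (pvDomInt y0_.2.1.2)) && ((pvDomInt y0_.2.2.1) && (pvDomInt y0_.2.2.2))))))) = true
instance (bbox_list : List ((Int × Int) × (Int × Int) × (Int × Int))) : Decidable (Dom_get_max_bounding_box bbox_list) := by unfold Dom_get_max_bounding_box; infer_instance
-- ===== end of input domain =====

-- ===== PORT A =====
-- A: unzip the boxes into six lists, then take min/max of each list.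
def get_max_bounding_box (bbox_list : List ((Int × Int) × (Int × Int) × (Int × Int))) : (Int × Int) × (Int × Int) × (Int × Int) :=
  let x_mins := bbox_list.map (fun b => b.1.1)
  let x_maxs := bbox_list.map (fun b => b.1.2)
  let y_mins := bbox_list.map (fun b => b.2.1.1)
  let y_maxs := bbox_list.map (fun b => b.2.1.2)
  let z_mins := bbox_list.map (fun b => b.2.2.1)
  let z_maxs := bbox_list.map (fun b => b.2.2.2)
  (((PySem.List.min? x_mins (fun y => y)).getD 0, (PySem.List.max? x_maxs (fun y => y)).getD 0),
   ((PySem.List.min? y_mins (fun y => y)).getD 0, (PySem.List.max? y_maxs (fun y => y)).getD 0),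
   ((PySem.List.min? z_mins (fun y => y)).getD 0, (PySem.List.max? z_maxs (fun y => y)).getD 0))

-- ===== PORT B =====
-- B: one fused pass keeping six running extremes, seeded from the first box.
def get_max_bounding_box_alt (bbox_list : List ((Int × Int) × (Int × Int) × (Int × Int))) : (Int × Int) × (Int × Int) × (Int × Int) :=
  match bbox_list with
  | [] => ((0, 0), (0, 0), (0, 0))  -- unreachable under Pre_ (Python B raises ValueError here, like A)
  | b :: rest =>
    rest.foldl (fun acc c =>
      ((min acc.1.1 c.1.1, max acc.1.2 c.1.2),
       (min acc.2.1.1 c.2.1.1, max acc.2.1.2 c.2.1.2),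
       (min acc.2.2.1 c.2.2.1, max acc.2.2.2 c.2.2.2))) b

-- ===== PRECONDITION & SPEC =====
-- Pre_ excludes exactly the empty list, on which Python A raises ValueError (min of empty sequence).
def Pre_get_max_bounding_box (bbox_list : List ((Int × Int) × (Int × Int) × (Int × Int))) : Prop := bbox_list ≠ []
instance (bbox_list : List ((Int × Int) × (Int × Int) × (Int × Int))) : Decidable (Pre_get_max_bounding_box bbox_list) := by unfold Pre_get_max_bounding_box; infer_instance
def pvWitness_get_max_bounding_box : (List ((Int × Int) × (Int × Int) × (Int × Int))) := [((0, 2), (1, 3), (-1, 4))]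
def Spec_get_max_bounding_box (bbox_list : List ((Int × Int) × (Int × Int) × (Int × Int))) (out : (Int × Int) × (Int × Int) × (Int × Int)) : Prop := out = get_max_bounding_box_alt bbox_list
instance (bbox_list : List ((Int × Int) × (Int × Int) × (Int × Int))) (out : (Int × Int) × (Int × Int) × (Int × Int)) : Decidable (Spec_get_max_bounding_box bbox_list out) := by unfold Spec_get_max_bounding_box; infer_instance

-- ===== CLAIM =====
def Claim_equal_get_max_bounding_box : Prop := ∀ (bbox_list : List ((Int × Int) × (Int × Int) × (Int × Int))), Dom_get_max_bounding_box bbox_list → Pre_get_max_bounding_box bbox_list → Spec_get_max_bounding_box bbox_list (get_max_bounding_box bbox_list)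

-- ===== LEMMAS AND PROOFS =====
-- The fused fold equals the six per-component folds, for any accumulator.
theorem fused_fold_proj (t : List ((Int × Int) × (Int × Int) × (Int × Int))) :
    ∀ acc : (Int × Int) × (Int × Int) × (Int × Int),
    t.foldl (fun acc c =>
      ((min acc.1.1 c.1.1, max acc.1.2 c.1.2),
       (min acc.2.1.1 c.2.1.1, max acc.2.1.2 c.2.1.2),
       (min acc.2.2.1 c.2.2.1, max acc.2.2.2 c.2.2.2))) acc
    = (((t.map (fun b => b.1.1)).foldl min acc.1.1, (t.map (fun b => b.1.2)).foldl max acc.1.2),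
       ((t.map (fun b => b.2.1.1)).foldl min acc.2.1.1, (t.map (fun b => b.2.1.2)).foldl max acc.2.1.2),
       ((t.map (fun b => b.2.2.1)).foldl min acc.2.2.1, (t.map (fun b => b.2.2.2)).foldl max acc.2.2.2)) := by
  induction t with
  | nil => intro acc; rfl
  | cons c t ih => intro acc; simp [List.foldl, ih]

-- ===== VERDICT =====
theorem get_max_bounding_box_spec : Claim_equal_get_max_bounding_box := by
  intro bbox_list _ hpre
  match bbox_list with
  | [] => exact absurd rfl hpre
  | b :: rest =>
    show get_max_bounding_box (b :: rest) = get_max_bounding_box_alt (b :: rest)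
    simp only [get_max_bounding_box, get_max_bounding_box_alt, List.map_cons,
      PySem.List.min?_id_cons, PySem.List.max?_id_cons, Option.getD_some, fused_fold_proj]
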